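-- pv_equiv track=rewrite | github.com/no-way-labs/residue | constructions/odd_construction.py | _make_layer_table
-- ===== SOURCE A (Python) =====
-- def _make_layer_table(m, layer_type):
--     """Return an m x m table of direction triples for one layer.
--
--     Each cell (x, y) gets a triple (d1, d2, d3) where d_c in {I, X, Y}
--     is the matching for color c.
--
--     layer_type is one of 'P0', 'P1', 'P2', 'Q2'.
--     """
--     table = [[None] * m for _ in range(m)]
--     for x in range(m):
--         for y in range(m):
--             on_diag = (x + y) % m == 0
--             # A: X off diagonal, Y on diagonal
--             # B: Y off diagonal, X on diagonal
--             A = "Y" if on_diag else "X"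
--             B = "X" if on_diag else "Y"
--             if layer_type == "P0":
--                 table[x][y] = ("I", B, A)
--             elif layer_type == "P1":
--                 table[x][y] = (B, "I", A)
--             elif layer_type == "P2":
--                 table[x][y] = (A, B, "I")
--             elif layer_type == "Q2":
--                 table[x][y] = (B, A, "I")
--             else:
--                 raise ValueError(f"unknown layer type: {layer_type}")
--     return table
-- ===== SOURCE B (Python) =====
-- _TRIPLES = {
--     "P0": (("I", "Y", "X"), ("I", "X", "Y")),
--     "P1": (("Y", "I", "X"), ("X", "I", "Y")),
--     "P2": (("X", "Y", "I"), ("Y", "X", "I")),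
--     "Q2": (("Y", "X", "I"), ("X", "Y", "I")),
-- }
--
--
-- def _make_layer_table(m, layer_type):
--     if m <= 0:
--         return []
--     try:
--         off, on = _TRIPLES[layer_type]
--     except KeyError:
--         raise ValueError(f"unknown layer type: {layer_type}")
--     table = [[off] * m for _ in range(m)]
--     for x in range(m):
--         table[x][(m - x) % m] = on
--     return table
-- ===== Notes on version B (the rewrite author's own statement) =====
-- stated objective: alternative
-- what changed: Instead of A's per-cell diagonal test and per-cell layer_type branch chain inside an m*m double loop, B looks the (off,on) triples up once in a dict, bulk-fills the m*m table with the off triple and patches the single diagonal cell of each row in one O(m) pass.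
import Mathlib
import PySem

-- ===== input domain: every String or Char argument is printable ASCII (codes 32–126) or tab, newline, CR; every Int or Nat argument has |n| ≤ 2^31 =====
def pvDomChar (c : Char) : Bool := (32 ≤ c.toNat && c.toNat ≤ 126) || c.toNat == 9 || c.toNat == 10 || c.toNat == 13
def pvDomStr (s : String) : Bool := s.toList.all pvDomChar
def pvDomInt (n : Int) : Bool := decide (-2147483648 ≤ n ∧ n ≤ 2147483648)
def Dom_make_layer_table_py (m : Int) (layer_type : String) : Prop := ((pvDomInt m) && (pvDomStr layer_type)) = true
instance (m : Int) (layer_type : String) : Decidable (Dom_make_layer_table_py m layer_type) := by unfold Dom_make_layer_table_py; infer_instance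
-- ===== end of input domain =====

-- B fills the whole table with the off-diagonal triple (looked up once in a dict)
-- and patches the single diagonal cell of each row, instead of A's per-cell
-- diagonal test and per-cell layer_type branch; return value proved equal on Pre_.

-- ===== PORT A =====
-- one cell of A's nested loop; the final 'else' branch is Python's
-- 'raise ValueError', excluded by Pre_ (placeholder value there)
def cellA (layer_type : String) (m x y : Int) : String × String × String :=
  let on_diag : Bool := PySem.Int.mod (x + y) m == 0
  let A : String := if on_diag then "Y" else "X"
  let B : String := if on_diag then "X" else "Y"
  if layer_type = "P0" then ("I", B, A)
  else if layer_type = "P1" then (B, "I", A)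
  else if layer_type = "P2" then (A, B, "I")
  else if layer_type = "Q2" then (B, A, "I")
  else ("", "", "")

def make_layer_table_py (m : Int) (layer_type : String) : List (List (String × String × String)) :=
  (PySem.List.pyRange 0 m 1).map (fun x =>
    (PySem.List.pyRange 0 m 1).map (fun y => cellA layer_type m x y))

-- ===== PORT B =====
def triplesB : PySem.Dict String ((String × String × String) × (String × String × String)) :=
  PySem.Dict.mk
    [ ("P0", (("I", "Y", "X"), ("I", "X", "Y")))
    , ("P1", (("Y", "I", "X"), ("X", "I", "Y")))
    , ("P2", (("X", "Y", "I"), ("Y", "X", "I")))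
    , ("Q2", (("Y", "X", "I"), ("X", "Y", "I"))) ]

def make_layer_table_py_alt (m : Int) (layer_type : String) : List (List (String × String × String)) :=
  if m ≤ 0 then []
  else
    match triplesB.get? layer_type with
    | none => []   -- Python raises ValueError here; excluded by Pre_
    | some (off, on) =>
      (PySem.List.pyRange 0 m 1).foldl
        (fun table x =>
          table.modify x.toNat (fun row => row.set (PySem.Int.mod (m - x) m).toNat on))
        (List.replicate m.toNat (List.replicate m.toNat off))

-- ===== PRECONDITION & SPEC =====
-- Pre_ excludes exactly the inputs on which A raises ValueError:
-- m > 0 together with an unknown layer_type.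
def Pre_make_layer_table_py (m : Int) (layer_type : String) : Prop :=
  m ≤ 0 ∨ layer_type = "P0" ∨ layer_type = "P1" ∨ layer_type = "P2" ∨ layer_type = "Q2"
instance (m : Int) (layer_type : String) : Decidable (Pre_make_layer_table_py m layer_type) := by
  unfold Pre_make_layer_table_py; infer_instance

def pvWitness_make_layer_table_py : Int × String := (3, "P1")

def Spec_make_layer_table_py (m : Int) (layer_type : String) (out : List (List (String × String × String))) : Prop := out = make_layer_table_py_alt m layer_type
instance (m : Int) (layer_type : String) (out : List (List (String × String × String))) : Decidable (Spec_make_layer_table_py m layer_type out) := by unfold Spec_make_layer_table_py; infer_instance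

-- ===== CLAIM (what is proved, stated in full; the proofs are below) =====
def Claim_equal_make_layer_table_py : Prop := ∀ (m : Int) (layer_type : String), Dom_make_layer_table_py m layer_type → Pre_make_layer_table_py m layer_type → Spec_make_layer_table_py m layer_type (make_layer_table_py m layer_type)

-- ===== LEMMAS AND PROOFS =====

-- B's patch loop over row indices 0..n-1 on a replicate-initialised table,
-- characterised as a map.
theorem foldl_modify_range {α : Type} (g : Nat → α → α) (base : α) :
    ∀ (n k : Nat),
      (List.range n).foldl (fun t x => t.modify x (g x)) (List.replicate (n + k) base)
        = (List.range n).map (fun i => g i base) ++ List.replicate k base := by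
  intro n
  induction n with
  | zero => intro k; simp
  | succ n ih =>
    intro k
    rw [List.range_succ, List.foldl_append]
    rw [show (n + 1 + k) = n + (k + 1) by omega, ih (k + 1)]
    simp only [List.foldl_cons, List.foldl_nil]
    apply List.ext_getElem
    · simp
    · intro j hj hj'
      have hjb : j < n + 1 + k := by simp at hj'; omega
      simp only [List.map_append, List.map_cons, List.map_nil, List.getElem_modify,
        List.getElem_append, List.getElem_map, List.getElem_range,
        List.getElem_replicate, List.getElem_singleton, List.length_map,
        List.length_range, List.length_append, List.length_replicate,
        List.length_cons, List.length_nil]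
      split_ifs <;> first | rfl | omega

theorem row_eq (m : Int) (hm : 0 < m) (x : Nat) (hx : (x : Int) < m)
    (offT onT : String × String × String)
    (cell : Int → Int → String × String × String)
    (hcell : ∀ x y : Int, 0 ≤ x → x < m → 0 ≤ y → y < m →
      cell x y = if PySem.Int.mod (x + y) m = 0 then onT else offT) :
    (PySem.List.pyRange 0 m 1).map (fun y => cell (x : Int) y)
      = (List.replicate m.toNat offT).set (PySem.Int.mod (m - (x : Int)) m).toNat onT := by
  rw [PySem.List.pyRange_one]
  apply List.ext_getElem
  · simp
  · intro j hj hj'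
    have hjm : (j : Int) < m := by
      simp at hj; omega
    simp only [List.getElem_map, List.getElem_range]
    rw [hcell (x : Int) (0 + (j : Int)) (by omega) hx (by omega) (by omega)]
    rw [List.getElem_set]
    simp only [List.getElem_replicate, zero_add]
    rw [PySem.Int.mod_eq_emod_of_pos hm, PySem.Int.mod_eq_emod_of_pos hm]
    have e1 : (m - (x : Int)) % m = if x = 0 then 0 else m - (x : Int) := by
      by_cases h0 : x = 0
      · rw [if_pos h0, h0]; simp
      · rw [if_neg h0, Int.emod_eq_of_lt (by omega) (by omega)]
    have e2 : ((x : Int) + (j : Int)) % m = 0 ↔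
        ((x : Int) + (j : Int) = 0 ∨ (x : Int) + (j : Int) = m) := by
      by_cases hlt : (x : Int) + (j : Int) < m
      · rw [Int.emod_eq_of_lt (by omega) hlt]; omega
      · rw [← Int.sub_emod_right ((x : Int) + (j : Int)) m,
            Int.emod_eq_of_lt (by omega) (by omega)]
        omega
    have hiff : (((x : Int) + (j : Int)) % m = 0) ↔ (((m - (x : Int)) % m).toNat = j) := by
      rw [e1, e2]
      split_ifs with h0 <;> omega
    by_cases h1 : ((x : Int) + (j : Int)) % m = 0
    · rw [if_pos h1, if_pos (hiff.mp h1)]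
    · rw [if_neg h1, if_neg (fun hc => h1 (hiff.mpr hc))]

theorem table_eq (m : Int) (hm : 0 < m)
    (offT onT : String × String × String)
    (cell : Int → Int → String × String × String)
    (hcell : ∀ x y : Int, 0 ≤ x → x < m → 0 ≤ y → y < m →
      cell x y = if PySem.Int.mod (x + y) m = 0 then onT else offT) :
    (PySem.List.pyRange 0 m 1).map (fun x => (PySem.List.pyRange 0 m 1).map (fun y => cell x y))
      = (PySem.List.pyRange 0 m 1).foldl
          (fun table x =>
            table.modify x.toNat (fun row => row.set (PySem.Int.mod (m - x) m).toNat onT))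
          (List.replicate m.toNat (List.replicate m.toNat offT)) := by
  conv_rhs => rw [PySem.List.pyRange_one, List.foldl_map]
  simp only [zero_add, Int.toNat_natCast, Int.sub_zero]
  rw [show (List.replicate m.toNat (List.replicate m.toNat offT))
        = List.replicate (m.toNat + 0) (List.replicate m.toNat offT) by simp]
  rw [foldl_modify_range
        (fun i row => row.set (PySem.Int.mod (m - (i : Int)) m).toNat onT)
        (List.replicate m.toNat offT) m.toNat 0]
  rw [List.replicate_zero, List.append_nil]
  conv_lhs => rw [PySem.List.pyRange_one, List.map_map]
  apply List.ext_getElem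
  · simp
  · intro i hi hi'
    have him : (i : Int) < m := by simp at hi'; omega
    simp only [List.getElem_map, List.getElem_range, Function.comp_apply, zero_add]
    have h := row_eq m hm i him offT onT cell hcell
    rw [PySem.List.pyRange_one] at h
    simpa using h

theorem per_layer (m : Int) (hm : 0 < m) (lt : String)
    (offT onT : String × String × String)
    (hget : triplesB.get? lt = some (offT, onT))
    (hcell : ∀ x y : Int, 0 ≤ x → x < m → 0 ≤ y → y < m →
      cellA lt m x y = if PySem.Int.mod (x + y) m = 0 then onT else offT) :
    make_layer_table_py m lt = make_layer_table_py_alt m lt := by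
  rw [make_layer_table_py, make_layer_table_py_alt, if_neg (by omega), hget]
  exact table_eq m hm offT onT (cellA lt m) hcell

-- ===== VERDICT (by name: the statement is the Claim_ definition above) =====
theorem make_layer_table_py_spec : Claim_equal_make_layer_table_py := by
  intro m lt _ hpre
  unfold Spec_make_layer_table_py
  by_cases hm : m ≤ 0
  · simp [make_layer_table_py, make_layer_table_py_alt, hm,
      PySem.List.pyRange_one_eq_nil (by omega : m ≤ 0)]
  · have hm' : 0 < m := by omega
    rcases hpre with h | h | h | h | h
    · omega
    · subst h
      refine per_layer m hm' "P0" ("I", "Y", "X") ("I", "X", "Y") (by decide) ?_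
      intro x y hx0 hxm hy0 hym
      by_cases hd : PySem.Int.mod (x + y) m = 0 <;> simp [cellA, hd]
    · subst h
      refine per_layer m hm' "P1" ("Y", "I", "X") ("X", "I", "Y") (by decide) ?_
      intro x y hx0 hxm hy0 hym
      by_cases hd : PySem.Int.mod (x + y) m = 0 <;> simp [cellA, hd]
    · subst h
      refine per_layer m hm' "P2" ("X", "Y", "I") ("Y", "X", "I") (by decide) ?_
      intro x y hx0 hxm hy0 hym
      by_cases hd : PySem.Int.mod (x + y) m = 0 <;> simp [cellA, hd]
    · subst h
      refine per_layer m hm' "Q2" ("Y", "X", "I") ("X", "Y", "I") (by decide) ?_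
      intro x y hx0 hxm hy0 hym
      by_cases hd : PySem.Int.mod (x + y) m = 0 <;> simp [cellA, hd]
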